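-- pv_equiv track=rewrite | github.com/derwin12/ML | generate_lyrics_track.py | _distribute_phonemes
-- ===== SOURCE A (Python) =====
-- _SHORT_PHONEME_MS = 50
--
-- _MIN_PHONEME_MS   = 25   # one frame at 25 ms sequence timing
--
-- def _distribute_phonemes(phonemes: list[str], word_start_ms: int, word_end_ms: int,
--                          min_ms: int = _MIN_PHONEME_MS,
--                          ) -> list[tuple[int, int, str]]:
--     """Distribute phonemes proportionally within a word's time window.
--
--     Each phoneme is guaranteed to be at least min_ms wide (one xLights frame).
--     If the word window is too short to fit all phonemes at min_ms, phonemes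
--     overflow past word_end_ms — xLights handles overlapping timing entries fine.
--     """
--     n = len(phonemes)
--     if n == 0:
--         return []
--     duration = word_end_ms - word_start_ms
--     if duration <= 0:
--         t = word_start_ms
--         result = []
--         for ph in phonemes:
--             result.append((t, t + min_ms, ph))
--             t += min_ms
--         return result
--
--     short_types = {"MBP", "etc"}
--     short_count = sum(1 for ph in phonemes if ph in short_types)
--     long_count  = n - short_count
--
--     short_ms = max(min_ms, min(_SHORT_PHONEME_MS, duration // max(n, 1)))
--     remaining = duration - short_ms * short_count
--     long_ms   = max(min_ms, remaining // max(long_count, 1))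
--
--     result = []
--     t = word_start_ms
--     for i, ph in enumerate(phonemes):
--         dur = short_ms if ph in short_types else long_ms
--         end = (t + dur) if i < n - 1 else max(t + min_ms, word_end_ms)
--         result.append((t, end, ph))
--         t = end
--     return result
-- ===== SOURCE B (Python) =====
-- _SHORT_PHONEME_MS = 50
-- _MIN_PHONEME_MS = 25
--
-- def _distribute_phonemes(phonemes, word_start_ms, word_end_ms, min_ms=_MIN_PHONEME_MS):
--     n = len(phonemes)
--     if n == 0:
--         return []
--     duration = word_end_ms - word_start_ms
--     if duration <= 0:
--         # degenerate window: closed-form min_ms grid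
--         return [(word_start_ms + i * min_ms, word_start_ms + (i + 1) * min_ms, ph)
--                 for i, ph in enumerate(phonemes)]
--     short_types = {"MBP", "etc"}
--     short_count = sum(ph in short_types for ph in phonemes)
--     long_count = n - short_count
--     short_ms = max(min_ms, min(_SHORT_PHONEME_MS, duration // max(n, 1)))
--     remaining = duration - short_ms * short_count
--     long_ms = max(min_ms, remaining // max(long_count, 1))
--
--     # stateless positional closed form: the start of phoneme i is determined
--     # directly by how many short phonemes precede position i
--     def start(i):
--         k = sum(ph in short_types for ph in phonemes[:i])
--         return word_start_ms + short_ms * k + long_ms * (i - k)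
--
--     return [(start(i),
--              start(i + 1) if i < n - 1 else max(start(i) + min_ms, word_end_ms),
--              ph)
--             for i, ph in enumerate(phonemes)]
-- ===== Notes on version B (the rewrite author's own statement) =====
-- stated objective: alternative
-- what changed: A walks the phonemes once carrying a running end-time t; B is stateless: it computes each phoneme's start directly by a positional closed form (start(i) = word_start_ms + short_ms*#shorts-before-i + long_ms*#longs-before-i) and each end as start(i+1), with the last end overridden by max(start+min_ms, word_end_ms).
import Mathlib
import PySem

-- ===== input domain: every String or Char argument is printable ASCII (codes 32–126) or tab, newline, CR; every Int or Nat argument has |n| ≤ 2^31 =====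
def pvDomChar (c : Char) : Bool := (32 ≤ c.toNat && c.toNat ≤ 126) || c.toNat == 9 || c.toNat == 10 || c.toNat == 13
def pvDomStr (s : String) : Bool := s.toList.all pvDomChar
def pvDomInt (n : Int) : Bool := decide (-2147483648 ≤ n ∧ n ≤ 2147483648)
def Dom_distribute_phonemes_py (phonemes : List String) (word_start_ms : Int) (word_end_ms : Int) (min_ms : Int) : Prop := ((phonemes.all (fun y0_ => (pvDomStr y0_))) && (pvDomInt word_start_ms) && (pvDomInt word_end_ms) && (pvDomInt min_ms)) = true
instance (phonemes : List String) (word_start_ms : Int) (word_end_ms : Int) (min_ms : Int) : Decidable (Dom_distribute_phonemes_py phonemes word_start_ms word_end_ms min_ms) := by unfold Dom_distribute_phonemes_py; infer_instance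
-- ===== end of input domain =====

-- B replaces A's stateful running-time loop by a stateless positional closed form:
-- each start is computed directly from the count of short phonemes before that index (alternative decomposition).

-- ===== PORT A =====
-- ph in {"MBP", "etc"}
def pvIsShort (ph : String) : Bool := ph == "MBP" || ph == "etc"

-- A's degenerate-window loop: result.append((t, t+min_ms, ph)); t += min_ms
def pvADegen (phonemes : List String) (t : Int) (min_ms : Int) : List (Int × Int × String) :=
  match phonemes with
  | [] => []
  | ph :: rest => (t, t + min_ms, ph) :: pvADegen rest (t + min_ms) min_ms

-- A's main loop over enumerate(phonemes), carrying t, with the last-element end override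
def pvAMain (phonemes : List String) (i n t short_ms long_ms min_ms word_end_ms : Int) :
    List (Int × Int × String) :=
  match phonemes with
  | [] => []
  | ph :: rest =>
    let dur := if pvIsShort ph then short_ms else long_ms
    let e := if i < n - 1 then t + dur else max (t + min_ms) word_end_ms
    (t, e, ph) :: pvAMain rest (i + 1) n e short_ms long_ms min_ms word_end_ms

def distribute_phonemes_py (phonemes : List String) (word_start_ms : Int) (word_end_ms : Int) (min_ms : Int) : List (Int × Int × String) :=
  let n : Int := phonemes.length
  if n = 0 then []
  else
    let duration := word_end_ms - word_start_ms
    if duration ≤ 0 then pvADegen phonemes word_start_ms min_ms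
    else
      let short_count : Int := (phonemes.filter pvIsShort).length
      let long_count := n - short_count
      let short_ms := max min_ms (min 50 (PySem.Int.floordiv duration (max n 1)))
      let remaining := duration - short_ms * short_count
      let long_ms := max min_ms (PySem.Int.floordiv remaining (max long_count 1))
      pvAMain phonemes 0 n word_start_ms short_ms long_ms min_ms word_end_ms

-- ===== PORT B =====
-- Source B's nested helper start(i): count of short phonemes in phonemes[:i] determines start directly
def pvCountShort (phs : List String) (i : Nat) : Int :=
  (((phs.take i).filter pvIsShort).length : Int)

def pvStartB (phs : List String) (ws s l : Int) (i : Nat) : Int :=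
  let k := pvCountShort phs i
  ws + s * k + l * ((i : Int) - k)

def distribute_phonemes_py_alt (phonemes : List String) (word_start_ms : Int) (word_end_ms : Int) (min_ms : Int) : List (Int × Int × String) :=
  let n : Int := phonemes.length
  if n = 0 then []
  else
    let duration := word_end_ms - word_start_ms
    if duration ≤ 0 then
      (PySem.List.enumerate phonemes).map
        (fun p => (word_start_ms + p.1 * min_ms, word_start_ms + (p.1 + 1) * min_ms, p.2))
    else
      let short_count : Int := (phonemes.filter pvIsShort).length
      let long_count := n - short_count
      let short_ms := max min_ms (min 50 (PySem.Int.floordiv duration (max n 1)))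
      let remaining := duration - short_ms * short_count
      let long_ms := max min_ms (PySem.Int.floordiv remaining (max long_count 1))
      (List.range phonemes.length).map (fun i =>
        (pvStartB phonemes word_start_ms short_ms long_ms i,
         if (i : Int) < n - 1 then pvStartB phonemes word_start_ms short_ms long_ms (i + 1)
         else max (pvStartB phonemes word_start_ms short_ms long_ms i + min_ms) word_end_ms,
         phonemes.getD i ""))

-- ===== PRECONDITION & SPEC =====
def Spec_distribute_phonemes_py (phonemes : List String) (word_start_ms : Int) (word_end_ms : Int) (min_ms : Int) (out : List (Int × Int × String)) : Prop := out = distribute_phonemes_py_alt phonemes word_start_ms word_end_ms min_ms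
instance (phonemes : List String) (word_start_ms : Int) (word_end_ms : Int) (min_ms : Int) (out : List (Int × Int × String)) : Decidable (Spec_distribute_phonemes_py phonemes word_start_ms word_end_ms min_ms out) := by unfold Spec_distribute_phonemes_py; infer_instance

-- ===== CLAIM (what is proved, stated in full; the proofs are below) =====
def Claim_equal_distribute_phonemes_py : Prop := ∀ (phonemes : List String) (word_start_ms : Int) (word_end_ms : Int) (min_ms : Int), Dom_distribute_phonemes_py phonemes word_start_ms word_end_ms min_ms → Spec_distribute_phonemes_py phonemes word_start_ms word_end_ms min_ms (distribute_phonemes_py phonemes word_start_ms word_end_ms min_ms)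

-- ===== LEMMAS AND PROOFS =====

theorem pvCountShort_zero (phs : List String) : pvCountShort phs 0 = 0 := by
  simp [pvCountShort]

theorem pvCountShort_cons_succ (ph : String) (tail : List String) (k : Nat) :
    pvCountShort (ph :: tail) (k + 1) =
      (if pvIsShort ph then 1 else 0) + pvCountShort tail k := by
  simp only [pvCountShort, List.take_succ_cons, List.filter_cons]
  split <;> simp <;> omega

theorem pvStartB_zero (phs : List String) (ws s l : Int) : pvStartB phs ws s l 0 = ws := by
  simp [pvStartB, pvCountShort_zero]

theorem pvStartB_cons_succ (ph : String) (tail : List String) (ws s l : Int) (k : Nat) :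
    pvStartB (ph :: tail) ws s l (k + 1) =
      pvStartB tail (ws + (if pvIsShort ph then s else l)) s l k := by
  simp only [pvStartB, pvCountShort_cons_succ]
  split <;> push_cast <;> ring

-- the degenerate branch: A's running-t loop equals B's closed-form map over enumerate
theorem pvADegen_shift (phonemes : List String) (s t m : Int) :
    pvADegen phonemes t m =
      (PySem.List.enumerate phonemes s).map
        (fun p => (t + (p.1 - s) * m, t + (p.1 - s + 1) * m, p.2)) := by
  induction phonemes generalizing s t with
  | nil => simp [pvADegen, PySem.List.enumerate_nil]
  | cons ph rest ih =>
    simp only [pvADegen, PySem.List.enumerate_cons, List.map_cons]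
    rw [ih (s + 1) (t + m)]
    congr 1
    · refine Prod.ext (by ring) (Prod.ext (by ring) rfl)
    · apply List.map_congr_left
      intro p _
      refine Prod.ext (by ring) (Prod.ext (by ring) rfl)

theorem pvADegen_eq (phonemes : List String) (t m : Int) :
    pvADegen phonemes t m =
      (PySem.List.enumerate phonemes).map (fun p => (t + p.1 * m, t + (p.1 + 1) * m, p.2)) := by
  rw [pvADegen_shift phonemes 0 t m]
  apply List.map_congr_left
  intro p _
  refine Prod.ext (by ring) (Prod.ext (by ring) rfl)

-- the main branch: A's stateful loop equals B's positional closed form, for any suffix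
theorem pvAMain_closed (rest : List String) (i0 : Nat) (n t s l m we : Int)
    (hn : (i0 : Int) + rest.length = n) :
    pvAMain rest i0 n t s l m we =
      (List.range rest.length).map (fun k =>
        (pvStartB rest t s l k,
         if (i0 : Int) + k < n - 1 then pvStartB rest t s l (k + 1)
         else max (pvStartB rest t s l k + m) we,
         rest.getD k "")) := by
  induction rest generalizing i0 t with
  | nil => simp [pvAMain]
  | cons ph tail ih =>
    simp only [List.length_cons]
    rw [List.range_succ_eq_map, List.map_cons, List.map_map]
    cases tail with
    | nil =>
      have hi : ¬ ((i0 : Int) < n - 1) := by simp at hn; omega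
      simp only [pvAMain, hi, if_false]
      simp [hi, pvStartB_zero]
    | cons ph2 rest2 =>
      have hi : (i0 : Int) < n - 1 := by
        simp only [List.length_cons] at hn; push_cast at hn; omega
      have hn' : ((i0 + 1 : Nat) : Int) + ((ph2 :: rest2).length : Int) = n := by
        simp only [List.length_cons] at hn ⊢; push_cast at hn ⊢; omega
      have hstep : pvAMain (ph :: ph2 :: rest2) i0 n t s l m we =
          (t, t + (if pvIsShort ph then s else l), ph) ::
            pvAMain (ph2 :: rest2) ((i0 : Int) + 1) n (t + if pvIsShort ph then s else l) s l m we := by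
        conv_lhs => rw [pvAMain]
        simp [hi]
      rw [hstep]
      have hcast : ((i0 + 1 : Nat) : Int) = (i0 : Int) + 1 := by push_cast; ring
      rw [show ((i0 : Int) + 1) = ((i0 + 1 : Nat) : Int) from hcast.symm,
        ih (i0 + 1) (t + if pvIsShort ph then s else l) hn']
      congr 1
      · -- head element
        have h0 : (i0 : Int) + ((0 : Nat) : Int) < n - 1 := by push_cast; omega
        have h1 : pvStartB (ph :: ph2 :: rest2) t s l (0 + 1) = t + (if pvIsShort ph then s else l) := by
          rw [pvStartB_cons_succ, pvStartB_zero]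
        simp [h1, pvStartB_zero]
        intro hcontra
        exact absurd hcontra (by omega)
      · apply List.map_congr_left
        intro k _
        have hc : ((i0 : Int) + ((k + 1 : Nat) : Int) < n - 1) ↔
            (((i0 + 1 : Nat) : Int) + (k : Int) < n - 1) := by
          push_cast; constructor <;> intro <;> omega
        simp only [Function.comp, Nat.succ_eq_add_one, List.getD_cons_succ,
          pvStartB_cons_succ, hc]

-- ===== VERDICT (by name: the statement is the Claim_ definition above) =====
theorem distribute_phonemes_py_spec : Claim_equal_distribute_phonemes_py := by
  intro phonemes ws we m _
  unfold Spec_distribute_phonemes_py distribute_phonemes_py distribute_phonemes_py_alt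
  by_cases h0 : (phonemes.length : Int) = 0
  · simp [h0]
  · simp only [h0]
    by_cases hd : we - ws ≤ 0
    · simp [hd, pvADegen_eq]
    · simp only [hd, if_false]
      rw [show (0 : Int) = ((0 : Nat) : Int) from rfl, pvAMain_closed phonemes 0 _ ws _ _ m we (by push_cast; ring)]
      apply List.map_congr_left
      intro k _
      have : (((0 : Nat) : Int) + (k : Int) < (phonemes.length : Int) - 1) ↔ ((k : Int) < (phonemes.length : Int) - 1) := by
        push_cast; omega
      simp only [this]
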